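-- pv_equiv track=rewrite | github.com/nenad-misic/Tetris-AI | tetris.py | holes
-- ===== SOURCE A (Python) =====
-- def holes(current_grid):
--     populated_grid = {}
--     holes = 0
--     for rownum, row in enumerate(current_grid):
--         for colnum, piece in enumerate(row):
--             if piece == (0,0,0):
--                 if colnum in populated_grid:
--                     holes += 1
--             else:
--                 populated_grid[colnum] = True
--     return holes
-- ===== SOURCE B (Python) =====
-- def holes(current_grid):
--     width = 0
--     for row in current_grid:
--         width = max(width, len(row))
--     total = 0
--     for c in range(width):
--         seen = False
--         count = 0
--         for row in current_grid:
--             if c < len(row):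
--                 cell = row[c]
--                 if cell == (0, 0, 0):
--                     if seen:
--                         count += 1
--                 else:
--                     seen = True
--         total += count
--     return total
-- ===== Notes on version B (the rewrite author's own statement) =====
-- stated objective: alternative
-- what changed: Column-major traversal: instead of one row-major pass maintaining a dict of populated columns, B walks each column top to bottom with a single boolean 'seen' flag, guarding ragged rows by length, and sums the per-column hole counts.
import Mathlib
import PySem

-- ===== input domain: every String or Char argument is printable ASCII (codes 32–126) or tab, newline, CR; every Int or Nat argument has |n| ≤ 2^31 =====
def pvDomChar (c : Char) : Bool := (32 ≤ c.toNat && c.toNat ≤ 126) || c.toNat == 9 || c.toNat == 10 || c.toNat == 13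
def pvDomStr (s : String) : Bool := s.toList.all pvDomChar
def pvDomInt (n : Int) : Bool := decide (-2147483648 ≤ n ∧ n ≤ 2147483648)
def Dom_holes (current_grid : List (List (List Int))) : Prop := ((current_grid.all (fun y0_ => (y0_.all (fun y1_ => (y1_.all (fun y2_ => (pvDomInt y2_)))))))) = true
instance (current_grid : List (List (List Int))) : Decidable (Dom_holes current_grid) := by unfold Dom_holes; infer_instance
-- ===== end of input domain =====

-- B replaces A's row-major pass (dict of populated columns) with a column-major sweep:
-- one boolean 'seen' per column, summing per-column hole counts; same cost, no dict.

-- ===== PORT A =====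
-- row-major pass over enumerate; state = (dict of populated columns, hole count)
def holes (current_grid : List (List (List Int))) : Int :=
  (current_grid.foldl
    (fun (st : PySem.Dict Int Bool × Int) row =>
      (PySem.List.enumerate row 0).foldl
        (fun (st : PySem.Dict Int Bool × Int) p =>
          if p.2 == [0, 0, 0] then
            (if st.1.contains p.1 then (st.1, st.2 + 1) else st)
          else
            (st.1.insert p.1 true, st.2))
        st)
    (PySem.Dict.empty, 0)).2

-- ===== PORT B =====
-- column-major sweep: for each column c, fold over the rows with (seen, count)
def holes_alt (current_grid : List (List (List Int))) : Int :=
  let width : Nat := current_grid.foldl (fun m row => max m row.length) 0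
  (List.range width).foldl
    (fun total c =>
      total +
        (current_grid.foldl
          (fun (st : Bool × Int) (row : List (List Int)) =>
            match row[c]? with
            | none => st
            | some cell =>
                if cell == ([0, 0, 0] : List Int) then (st.1, if st.1 then st.2 + 1 else st.2)
                else (true, st.2))
          (false, 0)).2)
    0

-- ===== PRECONDITION & SPEC =====
def Spec_holes (current_grid : List (List (List Int))) (out : Int) : Prop := out = holes_alt current_grid
instance (current_grid : List (List (List Int))) (out : Int) : Decidable (Spec_holes current_grid out) := by unfold Spec_holes; infer_instance

-- ===== CLAIM (what is proved, stated in full; the proofs are below) =====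
def Claim_equal_holes : Prop := ∀ (current_grid : List (List (List Int))), Dom_holes current_grid → Spec_holes current_grid (holes current_grid)

-- ===== LEMMAS AND PROOFS =====

-- functional model of A's row step: process one enumerated row against a column predicate f
def rowF : List (Int × List Int) → (Int → Bool) → ((Int → Bool) × Int)
  | [], f => (f, 0)
  | (c, cell) :: rest, f =>
    if cell == [0, 0, 0] then
      let r := rowF rest f
      (r.1, (if f c then (1 : Int) else 0) + r.2)
    else rowF rest (fun x => if x = c then true else f x)

-- functional model of A's whole loop
def gridF : List (List (List Int)) → (Int → Bool) → Int
  | [], _ => 0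
  | row :: rs, f =>
    (rowF (PySem.List.enumerate row 0) f).2 + gridF rs (rowF (PySem.List.enumerate row 0) f).1

-- whether column c is populated in row (indices starting at s)
def popRow : List (List Int) → Int → Int → Bool
  | [], _, _ => false
  | cell :: rest, s, c => (decide (c = s) && cell != [0, 0, 0]) || popRow rest (s + 1) c

-- holes contributed by one row given the predicate f
def holesRow : List (List Int) → Int → (Int → Bool) → Int
  | [], _, _ => 0
  | cell :: rest, s, f => (if cell == [0, 0, 0] && f s then (1 : Int) else 0) + holesRow rest (s + 1) f

-- B's per-column run as a recursion
def cRun : List (List (List Int)) → Nat → Bool → Int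
  | [], _, _ => 0
  | row :: rs, c, s =>
    match row[c]? with
    | none => cRun rs c s
    | some cell =>
        if cell == [0, 0, 0] then (if s then (1 : Int) else 0) + cRun rs c s
        else cRun rs c true

lemma A_inner (l : List (Int × List Int)) (d : PySem.Dict Int Bool) (n : Int)
    (f : Int → Bool) (h : ∀ c, d.contains c = f c) :
    (∀ c, (l.foldl
        (fun (st : PySem.Dict Int Bool × Int) p =>
          if p.2 == [0, 0, 0] then
            (if st.1.contains p.1 then (st.1, st.2 + 1) else st)
          else
            (st.1.insert p.1 true, st.2)) (d, n)).1.contains c = (rowF l f).1 c)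
    ∧ (l.foldl
        (fun (st : PySem.Dict Int Bool × Int) p =>
          if p.2 == [0, 0, 0] then
            (if st.1.contains p.1 then (st.1, st.2 + 1) else st)
          else
            (st.1.insert p.1 true, st.2)) (d, n)).2 = n + (rowF l f).2 := by
  induction l generalizing d n f with
  | nil => exact ⟨h, by simp [rowF]⟩
  | cons p rest ih =>
    obtain ⟨c, cell⟩ := p
    simp only [List.foldl_cons, rowF]
    by_cases hc : cell == ([0,0,0] : List Int)
    · simp only [if_pos hc]
      by_cases hfc : f c
      · rw [if_pos (by rw [h c, hfc])]
        obtain ⟨h1, h2⟩ := ih d (n+1) f h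
        refine ⟨h1, ?_⟩
        rw [h2, if_pos hfc]; ring
      · rw [if_neg (by rw [h c]; simpa using hfc)]
        obtain ⟨h1, h2⟩ := ih d n f h
        refine ⟨h1, ?_⟩
        rw [h2, if_neg hfc]; ring
    · simp only [if_neg hc]
      exact ih (d.insert c true) n (fun x => if x = c then true else f x)
        (fun x => by
          rw [PySem.Dict.contains_insert]
          by_cases hx : x = c
          · simp [hx]
          · simp [hx, h x])

lemma A_outer (g : List (List (List Int))) (d : PySem.Dict Int Bool) (n : Int)
    (f : Int → Bool) (h : ∀ c, d.contains c = f c) :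
    (g.foldl
      (fun (st : PySem.Dict Int Bool × Int) row =>
        (PySem.List.enumerate row 0).foldl
          (fun (st : PySem.Dict Int Bool × Int) p =>
            if p.2 == [0, 0, 0] then
              (if st.1.contains p.1 then (st.1, st.2 + 1) else st)
            else
              (st.1.insert p.1 true, st.2))
          st) (d, n)).2 = n + gridF g f := by
  induction g generalizing d n f with
  | nil => simp [gridF]
  | cons row rs ih =>
    simp only [List.foldl_cons, gridF]
    obtain ⟨h1, h2⟩ := A_inner (PySem.List.enumerate row 0) d n f h
    set st := (PySem.List.enumerate row 0).foldl _ (d, n) with hst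
    have := ih st.1 st.2 (rowF (PySem.List.enumerate row 0) f).1 h1
    rw [Prod.mk.eta] at this
    rw [this, h2]; ring

lemma holesRow_congr (row : List (List Int)) (s : Int) (f g : Int → Bool)
    (h : ∀ c, s ≤ c → f c = g c) : holesRow row s f = holesRow row s g := by
  induction row generalizing s with
  | nil => rfl
  | cons cell rest ih =>
    simp only [holesRow, h s le_rfl]
    rw [ih (s+1) (fun c hc => h c (by omega))]

lemma popRow_lt (row : List (List Int)) (s c : Int) (h : c < s) : popRow row s c = false := by
  induction row generalizing s with
  | nil => rfl
  | cons cell rest ih =>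
    simp only [popRow, ih (s+1) (by omega)]
    simp; omega

lemma rowF_enum (row : List (List Int)) (s : Int) (f : Int → Bool) :
    (∀ c, (rowF (PySem.List.enumerate row s) f).1 c = (f c || popRow row s c))
    ∧ (rowF (PySem.List.enumerate row s) f).2 = holesRow row s f := by
  induction row generalizing s f with
  | nil => simp [PySem.List.enumerate, rowF, popRow, holesRow]
  | cons cell rest ih =>
    rw [PySem.List.enumerate_cons]
    simp only [rowF, popRow, holesRow]
    by_cases hc : cell == ([0,0,0] : List Int)
    · have hne : (cell != ([0,0,0] : List Int)) = false := by simpa using hc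
      simp only [if_pos hc]
      obtain ⟨h1, h2⟩ := ih (s+1) f
      constructor
      · intro c
        rw [h1 c, hne]
        simp
      · rw [h2, hc]
        simp
    · have hne : (cell != ([0,0,0] : List Int)) = true := by simpa using hc
      have hceq : (cell == ([0,0,0] : List Int)) = false := by simpa using hc
      simp only [if_neg hc]
      obtain ⟨h1, h2⟩ := ih (s+1) (fun x => if x = s then true else f x)
      constructor
      · intro c
        rw [h1 c, hne]
        by_cases hcs : c = s
        · simp [hcs]
        · simp [hcs]
      · rw [h2, hceq]
        simp only [Bool.false_and, Bool.false_eq_true, if_false, zero_add]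
        exact holesRow_congr rest (s+1) _ f (fun c hcge => by
          have hns : ¬ (c = s) := by omega
          simp [hns])

lemma popRow_get (row : List (List Int)) (s : Int) (j : Nat) :
    popRow row s (s + j) = (match row[j]? with
      | some cell => cell != [0, 0, 0]
      | none => false) := by
  induction row generalizing s j with
  | nil => simp [popRow]
  | cons cell rest ih =>
    cases j with
    | zero =>
      simp only [popRow, List.getElem?_cons_zero]
      have : popRow rest (s + 1) (s + (0:Nat)) = false := popRow_lt _ _ _ (by omega)
      rw [this]; simp
    | succ j =>
      simp only [popRow, List.getElem?_cons_succ]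
      have h1 : (decide ((s + (↑(j+1) : Int)) = s) && cell != [0,0,0]) = false := by
        simp; omega
      rw [h1]
      simp only [Bool.false_or]
      have h2 : s + (↑(j+1) : Int) = (s+1) + (↑j : Int) := by push_cast; ring
      rw [h2, ih]

lemma holesRow_sum (row : List (List Int)) (f : Int → Bool) (w : Nat) (hw : row.length ≤ w) :
    holesRow row 0 f = ∑ c ∈ Finset.range w, (match row[c]? with
      | some cell => if cell == [0, 0, 0] && f (c : Int) then (1 : Int) else 0
      | none => 0) := by
  have gen : ∀ (row : List (List Int)) (s : Int) (f : Int → Bool),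
      holesRow row s f = ∑ j ∈ Finset.range row.length, (match row[j]? with
        | some cell => if cell == ([0,0,0] : List Int) && f (s + (j : Int)) then (1 : Int) else 0
        | none => 0) := by
    intro row
    induction row with
    | nil => simp [holesRow]
    | cons cell rest ihr =>
      intro s f
      simp only [holesRow, List.length_cons]
      rw [Finset.sum_range_succ']
      simp only [List.getElem?_cons_succ, List.getElem?_cons_zero]
      rw [ihr (s+1) f]
      have hidx : ∀ j : ℕ, s + (((j : ℕ) + 1 : ℕ) : Int) = (s + 1) + (j : Int) := by
        intro j; push_cast; ring
      simp only [hidx, Nat.cast_zero, add_zero]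
      ring
  rw [gen row 0 f]
  have hz : ∀ j : ℕ, (0 : Int) + (j : Int) = (j : Int) := by intro j; ring
  simp only [hz]
  refine Finset.sum_subset (by intro x hx; simp only [Finset.mem_range] at hx ⊢; omega) ?_
  intro c _ hc
  have : row.length ≤ c := by simpa using hc
  rw [List.getElem?_eq_none this]

lemma B_inner (g : List (List (List Int))) (c : Nat) (s : Bool) (n : Int) :
    (g.foldl
      (fun (st : Bool × Int) (row : List (List Int)) =>
        match row[c]? with
        | none => st
        | some cell =>
            if cell == ([0, 0, 0] : List Int) then (st.1, if st.1 then st.2 + 1 else st.2)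
            else (true, st.2)) (s, n)).2 = n + cRun g c s := by
  induction g generalizing s n with
  | nil => simp [cRun]
  | cons row rs ih =>
    simp only [List.foldl_cons, cRun]
    cases hro : row[c]? with
    | none => exact ih s n
    | some cell =>
      by_cases hc : cell == ([0,0,0] : List Int)
      · simp only [if_pos hc]
        rw [ih]
        cases s <;> simp [add_comm, add_left_comm]
      · simp only [if_neg hc]
        rw [ih]

lemma B_outer (h : Nat → Int) (w : Nat) (n : Int) :
    ((List.range w).foldl (fun total c => total + h c) n) = n + ∑ c ∈ Finset.range w, h c := by
  induction w generalizing n with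
  | zero => simp
  | succ w ih =>
    rw [List.range_succ, List.foldl_append, ih, Finset.sum_range_succ]
    simp; ring

lemma sum_cRun (g : List (List (List Int))) (w : Nat) (f : Int → Bool)
    (hw : ∀ row ∈ g, row.length ≤ w) :
    (∑ c ∈ Finset.range w, cRun g c (f (c : Int))) = gridF g f := by
  induction g generalizing f with
  | nil => simp [cRun, gridF]
  | cons row rs ih =>
    have hrow : row.length ≤ w := hw row (List.mem_cons_self)
    have hrs : ∀ r ∈ rs, r.length ≤ w := fun r hr => hw r (List.mem_cons_of_mem _ hr)
    obtain ⟨h1, h2⟩ := rowF_enum row 0 f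
    have key : ∀ c ∈ Finset.range w, cRun (row :: rs) c (f (c : Int))
        = (match row[c]? with
            | some cell => if cell == ([0,0,0] : List Int) && f (c : Int) then (1 : Int) else 0
            | none => 0)
          + cRun rs c ((rowF (PySem.List.enumerate row 0) f).1 (c : Int)) := by
      intro c _
      have hp := popRow_get row 0 c
      rw [zero_add] at hp
      rw [h1 (c : Int)]
      simp only [cRun]
      cases hro : row[c]? with
      | none =>
        rw [hro] at hp
        simp only at hp
        simp [hp]
      | some cell =>
        rw [hro] at hp
        have hp' : popRow row 0 (c : Int) = (cell != ([0,0,0] : List Int)) := hp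
        by_cases hcell : cell == ([0,0,0] : List Int)
        · have hne : (cell != ([0,0,0] : List Int)) = false := by simpa using hcell
          simp only [hp', hne, hcell]
          cases hfc : f (c : Int) <;> simp
        · have hne : (cell != ([0,0,0] : List Int)) = true := by simpa using hcell
          have hceq : (cell == ([0,0,0] : List Int)) = false := by simpa using hcell
          simp only [hp', hne, hceq]
          simp
    rw [Finset.sum_congr rfl key, Finset.sum_add_distrib,
      ← holesRow_sum row f w hrow, ih _ hrs]
    simp only [gridF, h2]

lemma foldl_max_ge (g : List (List (List Int))) (a : Nat) :
    a ≤ g.foldl (fun m row => max m row.length) a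
    ∧ ∀ row ∈ g, row.length ≤ g.foldl (fun m row => max m row.length) a := by
  induction g generalizing a with
  | nil => simp
  | cons row rs ih =>
    simp only [List.foldl_cons]
    refine ⟨le_trans (le_max_left _ _) (ih (max a row.length)).1, ?_⟩
    intro r hr
    rcases List.mem_cons.mp hr with h | h
    · subst h; exact le_trans (le_max_right _ _) (ih (max a r.length)).1
    · exact (ih (max a row.length)).2 r h

-- ===== VERDICT (by name: the statement is the Claim_ definition above) =====
theorem holes_spec : Claim_equal_holes := by
  intro g _
  show holes g = holes_alt g
  unfold holes holes_alt
  rw [A_outer g PySem.Dict.empty 0 (fun _ => false) (fun c => by simp)]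
  rw [B_outer]
  have hin : ∀ c : ℕ, (g.foldl
      (fun (st : Bool × Int) (row : List (List Int)) =>
        match row[c]? with
        | none => st
        | some cell =>
            if cell == ([0, 0, 0] : List Int) then (st.1, if st.1 then st.2 + 1 else st.2)
            else (true, st.2)) (false, 0)).2 = cRun g c false := by
    intro c
    rw [B_inner g c false 0, zero_add]
  simp only [hin]
  rw [sum_cRun g _ (fun _ => false) (foldl_max_ge g 0).2]
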